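-- pv_equiv track=rewrite | github.com/uw-math-ai/PolyArithmeticCircuitsRL | TransformerMCTS/enhanced_models.py | build_readable_circuit
-- ===== SOURCE A (Python) =====
-- def build_readable_circuit(actions, variable_names):
--     """Build a human-readable representation of the circuit"""
--     expressions = []
--
--     for i, (op, in1, in2) in enumerate(actions):
--         if op == "input" and i < len(variable_names):
--             expressions.append(variable_names[i])
--         elif op == "input":
--             expressions.append(f"x_{i}")
--         elif op == "constant":
--             expressions.append("1")
--         else:
--             # Get expressions for inputs
--             in1_expr = expressions[in1]
--             in2_expr = expressions[in2]
--
--             # Build new expression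
--             if op == "add":
--                 # Parenthesize only if needed
--                 expr = f"{in1_expr} + {in2_expr}"
--             else:  # multiply
--                 # Add parentheses if inputs are additions
--                 if "+" in in1_expr and not (in1_expr.startswith("(") and in1_expr.endswith(")")):
--                     in1_expr = f"({in1_expr})"
--                 if "+" in in2_expr and not (in2_expr.startswith("(") and in2_expr.endswith(")")):
--                     in2_expr = f"({in2_expr})"
--                 expr = f"{in1_expr} × {in2_expr}"
--
--             expressions.append(expr)
--
--     # Return the final expression
--     return expressions[-1] if expressions else ""
-- ===== SOURCE B (Python) =====
-- def build_readable_circuit(actions, variable_names):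
--     """Top-down recursive rebuild: only the nodes reachable from the final action are rendered."""
--     if not actions:
--         return ""
--
--     def paren(s):
--         if "+" in s and not (s.startswith("(") and s.endswith(")")):
--             return f"({s})"
--         return s
--
--     def expr(i):
--         op, in1, in2 = actions[i]
--         if op == "input":
--             return variable_names[i] if i < len(variable_names) else f"x_{i}"
--         if op == "constant":
--             return "1"
--         a, b = expr(in1), expr(in2)
--         if op == "add":
--             return f"{a} + {b}"
--         return f"{paren(a)} × {paren(b)}"
--
--     return expr(len(actions) - 1)
-- ===== Notes on version B (the rewrite author's own statement) =====
-- stated objective: alternative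
-- what changed: The forward loop that materializes an expression string for every action into a list is replaced by a top-down recursive expr(i) that renders only the nodes reachable from the final action.
import Mathlib
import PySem

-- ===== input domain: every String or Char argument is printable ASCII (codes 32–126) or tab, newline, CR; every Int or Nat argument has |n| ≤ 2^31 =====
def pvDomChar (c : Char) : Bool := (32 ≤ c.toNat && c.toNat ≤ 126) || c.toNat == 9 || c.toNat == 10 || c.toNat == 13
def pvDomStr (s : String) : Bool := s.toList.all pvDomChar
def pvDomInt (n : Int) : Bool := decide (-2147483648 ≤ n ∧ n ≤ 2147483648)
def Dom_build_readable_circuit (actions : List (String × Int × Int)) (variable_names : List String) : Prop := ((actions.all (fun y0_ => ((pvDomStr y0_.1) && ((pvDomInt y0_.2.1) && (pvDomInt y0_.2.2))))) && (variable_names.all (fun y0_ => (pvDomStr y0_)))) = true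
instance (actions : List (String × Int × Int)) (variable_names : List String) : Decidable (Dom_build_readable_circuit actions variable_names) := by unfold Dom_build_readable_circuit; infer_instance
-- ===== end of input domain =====

-- B replaces A's forward loop filling a list of all node expressions by a top-down recursion
-- rendering only nodes reachable from the final action (objective: alternative decomposition).


-- ===== PORT A =====
-- one loop step of A (state: the `expressions` list; input: one enumerated action)
def pvStepA (variable_names : List String) (exprs : List String)
    (p : Int × String × Int × Int) : List String :=
  let i := p.1
  let op := p.2.1
  let in1 := p.2.2.1
  let in2 := p.2.2.2
  if op = "input" ∧ i < (variable_names.length : Int) then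
    exprs ++ [PySem.List.pyGetD variable_names i ""]
  else if op = "input" then
    exprs ++ ["x_" ++ PySem.Int.toStr i]
  else if op = "constant" then
    exprs ++ ["1"]
  else
    let in1_expr := PySem.List.pyGetD exprs in1 ""
    let in2_expr := PySem.List.pyGetD exprs in2 ""
    if op = "add" then
      exprs ++ [in1_expr ++ " + " ++ in2_expr]
    else
      let in1_expr' := if PySem.Str.isIn "+" in1_expr && !(PySem.Str.startswith in1_expr "(" && PySem.Str.endswith in1_expr ")") then "(" ++ in1_expr ++ ")" else in1_expr
      let in2_expr' := if PySem.Str.isIn "+" in2_expr && !(PySem.Str.startswith in2_expr "(" && PySem.Str.endswith in2_expr ")") then "(" ++ in2_expr ++ ")" else in2_expr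
      exprs ++ [in1_expr' ++ " × " ++ in2_expr']

def build_readable_circuit (actions : List (String × Int × Int)) (variable_names : List String) : String :=
  let expressions := (PySem.List.enumerate actions).foldl (pvStepA variable_names) []
  if expressions = [] then "" else PySem.List.pyGetD expressions (-1) ""

-- ===== PORT B =====
def pvParen (s : String) : String :=
  if PySem.Str.isIn "+" s && !(PySem.Str.startswith s "(" && PySem.Str.endswith s ")") then
    "(" ++ s ++ ")"
  else s

-- B's recursive `expr(i)`; the guard `h` only makes the recursion total: under
-- Pre_ every add/multiply reference satisfies it.
def pvExpr (actions : List (String × Int × Int)) (variable_names : List String) (i : Nat) : String :=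
  match actions[i]? with
  | none => ""
  | some (op, in1, in2) =>
    if op = "input" then
      if i < variable_names.length then variable_names.getD i "" else "x_" ++ PySem.Int.toStr (i : Int)
    else if op = "constant" then "1"
    else if h : 0 ≤ in1 ∧ in1.toNat < i ∧ 0 ≤ in2 ∧ in2.toNat < i then
      let a := pvExpr actions variable_names in1.toNat
      let b := pvExpr actions variable_names in2.toNat
      if op = "add" then a ++ " + " ++ b
      else pvParen a ++ " × " ++ pvParen b
    else ""
termination_by i
decreasing_by
  · exact h.2.1
  · exact h.2.2.2

def build_readable_circuit_alt (actions : List (String × Int × Int)) (variable_names : List String) : String :=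
  if actions = [] then "" else pvExpr actions variable_names (actions.length - 1)

-- ===== PRECONDITION & SPEC =====
-- Pre_ excludes circuits in which some non-input/constant action references outside [0, i):
-- references ≥ i (or < -i) make A raise IndexError; negative references are read by A from the
-- partially built list via Python's wraparound (an artefact), and B's recursion does not return there.
def Pre_build_readable_circuit (actions : List (String × Int × Int)) (variable_names : List String) : Prop :=
  ∀ i : Nat, i < actions.length →
    (let a := actions.getD i ("", 0, 0)
     a.1 ≠ "input" → a.1 ≠ "constant" →
       0 ≤ a.2.1 ∧ a.2.1 < (i : Int) ∧ 0 ≤ a.2.2 ∧ a.2.2 < (i : Int))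
instance (actions : List (String × Int × Int)) (variable_names : List String) : Decidable (Pre_build_readable_circuit actions variable_names) := by unfold Pre_build_readable_circuit; infer_instance

def pvWitness_build_readable_circuit : (List (String × Int × Int)) × List String :=
  ([("input", 0, 0), ("input", 0, 0), ("add", 0, 1), ("multiply", 2, 2)], ["a", "b"])

def Spec_build_readable_circuit (actions : List (String × Int × Int)) (variable_names : List String) (out : String) : Prop := out = build_readable_circuit_alt actions variable_names
instance (actions : List (String × Int × Int)) (variable_names : List String) (out : String) : Decidable (Spec_build_readable_circuit actions variable_names out) := by unfold Spec_build_readable_circuit; infer_instance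

-- ===== CLAIM (what is proved, stated in full; the proofs are below) =====
def Claim_equal_build_readable_circuit : Prop := ∀ (actions : List (String × Int × Int)) (variable_names : List String), Dom_build_readable_circuit actions variable_names → Pre_build_readable_circuit actions variable_names → Spec_build_readable_circuit actions variable_names (build_readable_circuit actions variable_names)

-- ===== LEMMAS AND PROOFS =====

theorem pvEnumerate_append_singleton {α : Type} (xs : List α) (x : α) (s : Int) :
    PySem.List.enumerate (xs ++ [x]) s = PySem.List.enumerate xs s ++ [(s + xs.length, x)] := by
  induction xs generalizing s with
  | nil => simp [PySem.List.enumerate_nil, PySem.List.enumerate_cons]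
  | cons y ys ih =>
      simp [PySem.List.enumerate_cons, ih]
      ring_nf

-- the prefix list A has built after n steps
def pvBuild (actions : List (String × Int × Int)) (variable_names : List String) (n : Nat) : List String :=
  (PySem.List.enumerate (actions.take n)).foldl (pvStepA variable_names) []

theorem pvGetD_lt {α : Type} (l : List α) (j : Nat) (d : α) (h : j < l.length) :
    l.getD j d = l[j] := by
  simp [List.getD_eq_getElem?_getD, List.getElem?_eq_getElem h]

theorem pvGetD_append_lt {α : Type} (l : List α) (x : α) (j : Nat) (d : α) (h : j < l.length) :
    (l ++ [x]).getD j d = l.getD j d := by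
  simp [List.getD_eq_getElem?_getD, List.getElem?_append_left h]

theorem pvGetD_append_self {α : Type} (l : List α) (x : α) (d : α) :
    (l ++ [x]).getD l.length d = x := by
  simp [List.getD_eq_getElem?_getD]

theorem pvMain (actions : List (String × Int × Int)) (variable_names : List String)
    (hpre : Pre_build_readable_circuit actions variable_names) :
    ∀ n, n ≤ actions.length →
      (pvBuild actions variable_names n).length = n ∧
      ∀ j, j < n → (pvBuild actions variable_names n).getD j "" = pvExpr actions variable_names j := by
  intro n
  induction n with
  | zero =>
      intro _
      refine ⟨by simp [pvBuild], by intro j hj; omega⟩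
  | succ n ih =>
      intro hlt
      have hn : n < actions.length := by omega
      obtain ⟨ihlen, ihval⟩ := ih (Nat.le_of_lt hn)
      have hget : actions[n]? = some actions[n] := List.getElem?_eq_getElem hn
      set a := actions[n] with ha
      have htake : actions.take (n + 1) = actions.take n ++ [a] := by
        rw [List.take_succ, hget]; rfl
      have hb : pvBuild actions variable_names (n + 1) =
          pvStepA variable_names (pvBuild actions variable_names n) ((n : Int), a) := by
        unfold pvBuild
        rw [htake, pvEnumerate_append_singleton, List.foldl_append]
        simp [List.length_take, Nat.min_eq_left (Nat.le_of_lt hn)]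
      have hkey : pvBuild actions variable_names (n + 1) =
          pvBuild actions variable_names n ++ [pvExpr actions variable_names n] := by
        rw [hb]
        have hexpr : pvExpr actions variable_names n =
            (match actions[n]? with
             | none => ""
             | some (op, in1, in2) =>
               if op = "input" then
                 if n < variable_names.length then variable_names.getD n ""
                 else "x_" ++ PySem.Int.toStr (n : Int)
               else if op = "constant" then "1"
               else if h : 0 ≤ in1 ∧ in1.toNat < n ∧ 0 ≤ in2 ∧ in2.toNat < n then
                 let a := pvExpr actions variable_names in1.toNat
                 let b := pvExpr actions variable_names in2.toNat
                 if op = "add" then a ++ " + " ++ b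
                 else pvParen a ++ " × " ++ pvParen b
               else "") := by
          rw [pvExpr]
        by_cases hop1 : a.1 = "input"
        · by_cases hvn : n < variable_names.length
          · have hstep : pvStepA variable_names (pvBuild actions variable_names n) ((n : Int), a) =
                pvBuild actions variable_names n ++ [PySem.List.pyGetD variable_names (n : Int) ""] := by
              unfold pvStepA
              rw [if_pos (show a.1 = "input" ∧ ((n : Nat) : Int) < (variable_names.length : Int) from
                ⟨hop1, by exact_mod_cast hvn⟩)]
            rw [hstep, hexpr, hget]
            obtain ⟨op, in1, in2⟩ := a
            simp_all [PySem.List.pyGetD_natCast]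
          · have hstep : pvStepA variable_names (pvBuild actions variable_names n) ((n : Int), a) =
                pvBuild actions variable_names n ++ ["x_" ++ PySem.Int.toStr (n : Int)] := by
              unfold pvStepA
              rw [if_neg (fun hc => hvn (Nat.cast_lt.mp hc.2)), if_pos hop1]
            rw [hstep, hexpr, hget]
            obtain ⟨op, in1, in2⟩ := a
            simp_all
        · by_cases hop2 : a.1 = "constant"
          · have hstep : pvStepA variable_names (pvBuild actions variable_names n) ((n : Int), a) =
                pvBuild actions variable_names n ++ ["1"] := by
              unfold pvStepA
              rw [if_neg (by rintro ⟨hx, -⟩; exact hop1 hx), if_neg hop1, if_pos hop2]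
            rw [hstep, hexpr, hget]
            obtain ⟨op, in1, in2⟩ := a
            simp_all
          · have hbounds := hpre n hn
            simp only [List.getD_eq_getElem?_getD, hget, Option.getD_some] at hbounds
            obtain ⟨h1, h2, h3, h4⟩ := hbounds hop1 hop2
            have hlen1 : a.2.1.toNat < n := by omega
            have hlen2 : a.2.2.toNat < n := by omega
            have hE1 : PySem.List.pyGetD (pvBuild actions variable_names n) a.2.1 "" =
                pvExpr actions variable_names a.2.1.toNat := by
              rw [PySem.List.pyGetD_eq_getElem _ _ h1 (by rw [ihlen]; exact_mod_cast h2)]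
              rw [← ihval a.2.1.toNat hlen1, pvGetD_lt _ _ _ (by omega)]
            have hE2 : PySem.List.pyGetD (pvBuild actions variable_names n) a.2.2 "" =
                pvExpr actions variable_names a.2.2.toNat := by
              rw [PySem.List.pyGetD_eq_getElem _ _ h3 (by rw [ihlen]; exact_mod_cast h4)]
              rw [← ihval a.2.2.toNat hlen2, pvGetD_lt _ _ _ (by omega)]
            unfold pvStepA
            rw [if_neg (by rintro ⟨hx, -⟩; exact hop1 hx), if_neg hop1, if_neg hop2]
            simp only [hE1, hE2]
            rw [hexpr, hget]
            obtain ⟨op, in1, in2⟩ := a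
            simp only at hop1 hop2 h1 h2 h3 h4 hlen1 hlen2
            simp only [if_neg hop1, if_neg hop2]
            rw [dif_pos ⟨h1, hlen1, h3, hlen2⟩]
            by_cases hadd : op = "add"
            · simp [hadd]
            · simp [hadd, pvParen]
      constructor
      · rw [hkey]; simp [ihlen]
      · intro j hj
        rw [hkey]
        rcases Nat.lt_or_ge j n with hjn | hjn
        · rw [pvGetD_append_lt _ _ _ _ (by omega), ihval j hjn]
        · have hjeq : j = n := by omega
          subst hjeq
          have hx := pvGetD_append_self (pvBuild actions variable_names j)
            (pvExpr actions variable_names j) ""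
          rw [ihlen] at hx
          exact hx

-- ===== VERDICT (by name: the statement is the Claim_ definition above) =====
theorem build_readable_circuit_spec : Claim_equal_build_readable_circuit := by
  intro actions variable_names _hdom hpre
  unfold Spec_build_readable_circuit build_readable_circuit build_readable_circuit_alt
  by_cases hnil : actions = []
  · subst hnil
    simp [PySem.List.enumerate_nil]
  · obtain ⟨hlen, hval⟩ := pvMain actions variable_names hpre actions.length le_rfl
    have hpos := List.length_pos_of_ne_nil hnil
    have hfull : (PySem.List.enumerate actions).foldl (pvStepA variable_names) [] =
        pvBuild actions variable_names actions.length := by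
      unfold pvBuild; rw [List.take_length]
    have hne : pvBuild actions variable_names actions.length ≠ [] := by
      intro h0
      rw [h0] at hlen
      simp at hlen
      omega
    simp only [hfull, if_neg hne, if_neg hnil]
    rw [PySem.List.pyGetD_neg_one _ _ hne, List.getLast_eq_getElem]
    rw [← pvGetD_lt _ _ "" (by omega), hlen]
    exact hval (actions.length - 1) (by omega)
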